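-- pv_equiv track=rewrite | github.com/emresin12/Algorithm_Analysis_Projects | Project2/MPI_Project.py | task_distributor
-- ===== SOURCE A (Python) =====
-- def task_distributor(tasks, num_worker):
--     #check if there is excess of workers
--     if num_worker > len(tasks):
--         output = {}
--         copy_tasks = tasks.copy()
--         for i in range(1, len(tasks) + 1):
--             output[int(i)] = copy_tasks[:1]
--             copy_tasks = copy_tasks[1:]
--         for i in range(len(tasks) + 1, num_worker + 1):
--             output[int(i)] = []
--         return output
--     num_tasks = len(tasks)
--     base_tasks_by_worker = int(num_tasks / num_worker)
--     mod = num_tasks % num_worker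
--     output = {}
--     copy_tasks = tasks.copy()
--
--     for i in range(1, num_worker + 1):
--         temp = 1 if mod > 0 else 0
--         output[int(i)] = copy_tasks[: base_tasks_by_worker + temp]
--         copy_tasks = copy_tasks[base_tasks_by_worker + temp :]
--         if mod != 0:
--             mod -= 1
--     return output
-- ===== SOURCE B (Python) =====
-- def task_distributor(tasks, num_worker):
--     n = len(tasks)
--     base = int(n / num_worker)
--     mod = n % num_worker
--     return {i: tasks[(i - 1) * base + min(i - 1, mod): i * base + min(i, mod)]
--             for i in range(1, num_worker + 1)}
-- ===== Notes on version B (the rewrite author's own statement) =====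
-- stated objective: faster
-- what changed: Replaced the stateful loop (running copy of the task list re-sliced every iteration, decrementing mod, special excess-workers branch) by a single dict comprehension whose chunk boundaries are computed in closed form as (i-1)*base+min(i-1,mod) .. i*base+min(i,mod); the redundant num_worker>len(tasks) branch is dropped because the general formula already yields it.
import Mathlib
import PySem

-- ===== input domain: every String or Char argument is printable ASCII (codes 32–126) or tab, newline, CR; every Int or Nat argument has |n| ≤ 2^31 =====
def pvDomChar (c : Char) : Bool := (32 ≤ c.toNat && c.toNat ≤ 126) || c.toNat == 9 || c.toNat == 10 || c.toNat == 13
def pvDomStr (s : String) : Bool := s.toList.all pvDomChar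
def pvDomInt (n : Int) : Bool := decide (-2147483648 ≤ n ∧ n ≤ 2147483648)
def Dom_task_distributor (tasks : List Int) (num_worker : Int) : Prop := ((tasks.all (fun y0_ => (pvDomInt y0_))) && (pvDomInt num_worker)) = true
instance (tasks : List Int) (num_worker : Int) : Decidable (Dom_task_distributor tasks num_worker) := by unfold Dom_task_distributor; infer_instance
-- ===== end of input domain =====

-- B replaces A's stateful chunking loop (running copy of the list, decrementing mod, special
-- excess-workers branch) by one pass with closed-form chunk boundaries (measured faster: A
-- re-copies the tail every iteration, B copies each element once).


-- ===== PORT A =====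
def task_distributor (tasks : List Int) (num_worker : Int) : List (Int × List Int) :=
  if num_worker > (tasks.length : Int) then
    -- excess of workers: one task each, then empty lists
    let st1 := (PySem.List.pyRange 1 ((tasks.length : Int) + 1) 1).foldl
      (fun (st : PySem.Dict Int (List Int) × List Int) i =>
        (st.1.insert i (PySem.List.slice st.2 none (some 1)),
         PySem.List.slice st.2 (some 1) none))
      (PySem.Dict.empty, tasks)
    ((PySem.List.pyRange ((tasks.length : Int) + 1) (num_worker + 1) 1).foldl
      (fun (d : PySem.Dict Int (List Int)) i => d.insert i ([] : List Int)) st1.1).items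
  else
    let num_tasks : Int := (tasks.length : Int)
    let base := PySem.Int.truncdiv num_tasks num_worker   -- int(num_tasks / num_worker); num_worker ≠ 0 in Pre_
    let st := (PySem.List.pyRange 1 (num_worker + 1) 1).foldl
      (fun (st : PySem.Dict Int (List Int) × List Int × Int) i =>
        let temp : Int := if st.2.2 > 0 then 1 else 0
        (st.1.insert i (PySem.List.slice st.2.1 none (some (base + temp))),
         PySem.List.slice st.2.1 (some (base + temp)) none,
         if st.2.2 ≠ 0 then st.2.2 - 1 else st.2.2))
      (PySem.Dict.empty, tasks, PySem.Int.mod num_tasks num_worker)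
    st.1.items

-- ===== PORT B =====
def task_distributor_alt (tasks : List Int) (num_worker : Int) : List (Int × List Int) :=
  let n : Int := (tasks.length : Int)
  let base := PySem.Int.truncdiv n num_worker   -- int(n / num_worker); num_worker ≠ 0 in Pre_
  let md := PySem.Int.mod n num_worker
  (PySem.List.pyRange 1 (num_worker + 1) 1).map
    (fun i => (i, PySem.List.slice tasks (some ((i - 1) * base + min (i - 1) md))
                    (some (i * base + min i md))))

-- ===== PRECONDITION & SPEC =====
-- Pre_ excludes exactly num_worker = 0, where the Python A raises ZeroDivisionError (B raises it too).
def Pre_task_distributor (tasks : List Int) (num_worker : Int) : Prop := num_worker ≠ 0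
instance (tasks : List Int) (num_worker : Int) : Decidable (Pre_task_distributor tasks num_worker) := by unfold Pre_task_distributor; infer_instance
def pvWitness_task_distributor : List Int × Int := ([1, 2, 3, 4, 5], 2)

def Spec_task_distributor (tasks : List Int) (num_worker : Int) (out : List (Int × List Int)) : Prop := out = task_distributor_alt tasks num_worker
instance (tasks : List Int) (num_worker : Int) (out : List (Int × List Int)) : Decidable (Spec_task_distributor tasks num_worker out) := by unfold Spec_task_distributor; infer_instance

-- ===== CLAIM (what is proved, stated in full; the proofs are below) =====
def Claim_equal_task_distributor : Prop := ∀ (tasks : List Int) (num_worker : Int), Dom_task_distributor tasks num_worker → Pre_task_distributor tasks num_worker → Spec_task_distributor tasks num_worker (task_distributor tasks num_worker)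

-- ===== LEMMAS AND PROOFS =====

-- a slice of a dropped list is a shifted slice of the original
lemma slice_drop_shift (xs : List Int) (c a b : Int) (hc : 0 ≤ c) (ha : 0 ≤ a) (hb : 0 ≤ b) :
    PySem.List.slice (xs.drop c.toNat) (some a) (some b)
      = PySem.List.slice xs (some (c + a)) (some (c + b)) := by
  rw [PySem.List.slice_toNat _ ha hb, PySem.List.slice_toNat _ (by omega) (by omega)]
  rw [List.drop_drop]
  have h1 : c.toNat + a.toNat = (c + a).toNat := by omega
  have h2 : b.toNat - a.toNat = (c + b).toNat - (c + a).toNat := by omega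
  rw [h1, h2]

-- one step of A's chunking loop shifts the closed-form boundary by base + temp
lemma chunk_bound_shift (base m md : Int) (hm : 1 ≤ m) (hmd : 0 ≤ md) :
    base + (if md > 0 then (1 : Int) else 0)
      + ((m - 1) * base + min (m - 1) (if md ≠ 0 then md - 1 else md))
      = m * base + min m md := by
  by_cases h : md > 0
  · rw [if_pos h, if_pos (by omega : md ≠ 0)]
    have h1 : min (m - 1) (md - 1) = min m md - 1 := by omega
    rw [h1]; ring
  · have hmd0 : md = 0 := by omega
    subst hmd0
    rw [if_neg h, if_neg (by simp : ¬ ((0 : Int) ≠ 0))]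
    have h1 : min (m - 1) (0 : Int) = 0 := by omega
    have h2 : min m (0 : Int) = 0 := by omega
    rw [h1, h2]; ring

lemma loopA_items (base : Int) (hb : 0 ≤ base) (n : Nat) :
    ∀ (i md : Int) (copy : List Int) (d : PySem.Dict Int (List Int)),
    0 ≤ md → (∀ j : Int, i ≤ j → d.contains j = false) →
    ((PySem.List.pyRange i (i + (n : Int)) 1).foldl
      (fun (st : PySem.Dict Int (List Int) × List Int × Int) k =>
        let temp : Int := if st.2.2 > 0 then 1 else 0
        (st.1.insert k (PySem.List.slice st.2.1 none (some (base + temp))),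
         PySem.List.slice st.2.1 (some (base + temp)) none,
         if st.2.2 ≠ 0 then st.2.2 - 1 else st.2.2))
      (d, copy, md)).1.items
    = d.items ++ (PySem.List.pyRange i (i + (n : Int)) 1).map
        (fun j => (j, PySem.List.slice copy (some ((j - i) * base + min (j - i) md))
                        (some ((j - i + 1) * base + min (j - i + 1) md)))) := by
  induction n with
  | zero =>
    intro i md copy d hmd hfresh
    rw [PySem.List.pyRange_one_eq_nil (by omega)]
    simp
  | succ n ih =>
    intro i md copy d hmd hfresh
    have hbound : i + ((n + 1 : Nat) : Int) = (i + 1) + (n : Int) := by push_cast; ring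
    rw [hbound, PySem.List.pyRange_one_cons (by omega), List.foldl_cons, List.map_cons]
    simp only []
    rw [ih (i + 1) _ _ _ (by split_ifs <;> omega)
        (by intro j hj
            rw [PySem.Dict.contains_insert]
            simp only [Bool.or_eq_false_iff]
            exact ⟨by simp [show j ≠ i by omega], hfresh j (by omega)⟩)]
    rw [PySem.Dict.items_insert_of_not_contains _ _ (hfresh i le_rfl), List.append_assoc]
    congr 1
    rw [List.singleton_append]
    have e1 : (i - i) * base + min (i - i) md = 0 := by
      rw [sub_self, zero_mul, zero_add]; exact min_eq_left hmd
    have e2 : (i - i + 1) * base + min (i - i + 1) md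
        = base + (if md > 0 then (1 : Int) else 0) := by
      by_cases h : md > 0
      · rw [if_pos h, sub_self, zero_add, one_mul]
        have : min (1 : Int) md = 1 := by omega
        rw [this]
      · rw [if_neg h, sub_self, zero_add, one_mul]
        have : min (1 : Int) md = 0 := by omega
        rw [this, add_zero]
    rw [e1, e2, PySem.List.slice_zero_start]
    congr 1
    apply List.map_congr_left
    intro j hj
    rw [PySem.List.mem_pyRange_one] at hj
    have hmd' : 0 ≤ (if md ≠ 0 then md - 1 else md) := by split_ifs <;> omega
    have htemp : 0 ≤ (if md > 0 then (1 : Int) else 0) := by split_ifs <;> omega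
    have ha' : 0 ≤ (j - (i + 1)) * base + min (j - (i + 1)) (if md ≠ 0 then md - 1 else md) := by
      have h1 : (0 : Int) ≤ (j - (i + 1)) * base := mul_nonneg (by omega) hb
      have h2 : (0 : Int) ≤ min (j - (i + 1)) (if md ≠ 0 then md - 1 else md) := by
        split_ifs at * <;> omega
      linarith
    have hb' : 0 ≤ (j - (i + 1) + 1) * base + min (j - (i + 1) + 1) (if md ≠ 0 then md - 1 else md) := by
      have h1 : (0 : Int) ≤ (j - (i + 1) + 1) * base := mul_nonneg (by omega) hb
      have h2 : (0 : Int) ≤ min (j - (i + 1) + 1) (if md ≠ 0 then md - 1 else md) := by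
        split_ifs at * <;> omega
      linarith
    have hc : (0 : Int) ≤ base + (if md > 0 then (1 : Int) else 0) := by linarith
    rw [PySem.List.slice_from _ hc]
    rw [slice_drop_shift _ _ _ _ hc ha' hb']
    have er1 : j - (i + 1) = j - i - 1 := by ring
    rw [er1]
    have er2 : j - i - 1 + 1 = j - i + 1 - 1 := by ring
    rw [er2]
    rw [chunk_bound_shift base (j - i) md (by omega) hmd,
        chunk_bound_shift base (j - i + 1) md (by omega) hmd]


lemma loop1_items (n : Nat) :
    ∀ (i : Int) (copy : List Int) (d : PySem.Dict Int (List Int)),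
    (∀ j : Int, i ≤ j → d.contains j = false) →
    ((PySem.List.pyRange i (i + (n : Int)) 1).foldl
      (fun (st : PySem.Dict Int (List Int) × List Int) k =>
        (st.1.insert k (PySem.List.slice st.2 none (some 1)),
         PySem.List.slice st.2 (some 1) none))
      (d, copy)).1.items
    = d.items ++ (PySem.List.pyRange i (i + (n : Int)) 1).map
        (fun j => (j, PySem.List.slice copy (some (j - i)) (some (j - i + 1)))) := by
  induction n with
  | zero =>
    intro i copy d hfresh
    rw [PySem.List.pyRange_one_eq_nil (by omega)]
    simp
  | succ n ih =>
    intro i copy d hfresh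
    have hbound : i + ((n + 1 : Nat) : Int) = (i + 1) + (n : Int) := by push_cast; ring
    rw [hbound, PySem.List.pyRange_one_cons (by omega), List.foldl_cons, List.map_cons]
    simp only []
    rw [ih (i + 1) _ _
        (by intro j hj
            rw [PySem.Dict.contains_insert]
            simp only [Bool.or_eq_false_iff]
            exact ⟨by simp [show j ≠ i by omega], hfresh j (by omega)⟩)]
    rw [PySem.Dict.items_insert_of_not_contains _ _ (hfresh i le_rfl), List.append_assoc]
    congr 1
    rw [List.singleton_append]
    rw [sub_self, zero_add, PySem.List.slice_zero_start]
    congr 1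
    apply List.map_congr_left
    intro j hj
    rw [PySem.List.mem_pyRange_one] at hj
    rw [PySem.List.slice_from _ (by omega : (0 : Int) ≤ 1)]
    rw [slice_drop_shift _ _ _ _ (by omega) (by omega) (by omega)]
    have f1 : 1 + (j - (i + 1)) = j - i := by ring
    have f2 : 1 + (j - (i + 1) + 1) = j - i + 1 := by ring
    rw [f1, f2]

-- ===== VERDICT (by name: the statement is the Claim_ definition above) =====
theorem task_distributor_spec : Claim_equal_task_distributor := by
  intro tasks w _hdom hpre
  unfold Pre_task_distributor at hpre
  unfold Spec_task_distributor task_distributor task_distributor_alt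
  have hn0 : (0 : Int) ≤ (tasks.length : Int) := Int.natCast_nonneg _
  by_cases hgt : w > (tasks.length : Int)
  · -- excess-workers branch of A
    rw [if_pos hgt]
    simp only []
    have hwpos : 0 < w := by omega
    have hcomm : (tasks.length : Int) + 1 = 1 + (tasks.length : Int) := by ring
    rw [hcomm]
    have hitems :
        ((PySem.List.pyRange 1 (1 + (tasks.length : Int)) 1).foldl
          (fun (st : PySem.Dict Int (List Int) × List Int) i =>
            (st.1.insert i (PySem.List.slice st.2 none (some 1)),
             PySem.List.slice st.2 (some 1) none))
          (PySem.Dict.empty, tasks)).1.items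
        = (PySem.List.pyRange 1 (1 + (tasks.length : Int)) 1).map
            (fun j => (j, PySem.List.slice tasks (some (j - 1)) (some (j - 1 + 1)))) := by
      simpa using loop1_items tasks.length 1 tasks PySem.Dict.empty
        (fun j _ => PySem.Dict.contains_empty j)
    have hkeys :
        ((PySem.List.pyRange 1 (1 + (tasks.length : Int)) 1).foldl
          (fun (st : PySem.Dict Int (List Int) × List Int) i =>
            (st.1.insert i (PySem.List.slice st.2 none (some 1)),
             PySem.List.slice st.2 (some 1) none))
          (PySem.Dict.empty, tasks)).1.keys
        = PySem.List.pyRange 1 (1 + (tasks.length : Int)) 1 := by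
      simp only [PySem.Dict.keys, hitems, List.map_map]
      simp [Function.comp_def]
    have hcont : ∀ a ∈ PySem.List.pyRange (1 + (tasks.length : Int)) (w + 1) 1,
        ((PySem.List.pyRange 1 (1 + (tasks.length : Int)) 1).foldl
          (fun (st : PySem.Dict Int (List Int) × List Int) i =>
            (st.1.insert i (PySem.List.slice st.2 none (some 1)),
             PySem.List.slice st.2 (some 1) none))
          (PySem.Dict.empty, tasks)).1.contains a = false := by
      intro a ha
      rw [PySem.List.mem_pyRange_one] at ha
      rw [PySem.Dict.contains_eq_decide_mem_keys, hkeys]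
      simp [PySem.List.mem_pyRange_one]
      omega
    rw [PySem.Dict.items_foldl_insert_fresh _ (fun a => a) (fun _ => ([] : List Int)) _ hcont
        (by simpa using PySem.List.nodup_pyRange_one (1 + (tasks.length : Int)) (w + 1))]
    rw [hitems]
    have hbase0 : PySem.Int.truncdiv (tasks.length : Int) w = 0 :=
      Int.tdiv_eq_zero_of_lt hn0 hgt
    have hmdlen : PySem.Int.mod (tasks.length : Int) w = (tasks.length : Int) := by
      rw [PySem.Int.mod_eq_emod_of_pos hwpos]
      exact Int.emod_eq_of_lt hn0 hgt
    rw [hbase0, hmdlen]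
    simp only [mul_zero, zero_add]
    rw [PySem.List.pyRange_one_append 1 (1 + (tasks.length : Int)) (w + 1) (by omega) (by omega),
        List.map_append]
    congr 1
    · apply List.map_congr_left
      intro j hj
      rw [PySem.List.mem_pyRange_one] at hj
      have m1 : min (j - 1) ((tasks.length : Int)) = j - 1 := by omega
      have m2 : min j ((tasks.length : Int)) = j := by omega
      rw [m1, m2, show j - 1 + 1 = j from by ring]
    · apply List.map_congr_left
      intro j hj
      rw [PySem.List.mem_pyRange_one] at hj
      have m1 : min (j - 1) ((tasks.length : Int)) = (tasks.length : Int) := by omega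
      have m2 : min j ((tasks.length : Int)) = (tasks.length : Int) := by omega
      rw [m1, m2, PySem.List.slice_toNat _ hn0 hn0]
      simp
  · -- general branch of A
    rw [if_neg hgt]
    simp only []
    by_cases hwpos : 0 < w
    · have hb : 0 ≤ PySem.Int.truncdiv (tasks.length : Int) w :=
        Int.tdiv_nonneg hn0 (le_of_lt hwpos)
      have hmd : 0 ≤ PySem.Int.mod (tasks.length : Int) w :=
        PySem.Int.mod_nonneg _ hwpos
      have hw1 : w + 1 = 1 + ((w.toNat : Nat) : Int) := by omega
      rw [hw1]
      rw [loopA_items _ hb w.toNat 1 _ tasks PySem.Dict.empty hmd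
          (fun j _ => PySem.Dict.contains_empty j)]
      simp only [show (PySem.Dict.empty : PySem.Dict Int (List Int)).items = [] from rfl,
        List.nil_append]
      apply List.map_congr_left
      intro j _
      rw [show j - 1 + 1 = j from by ring]
    · -- w < 0: the loop range is empty on both sides
      rw [PySem.List.pyRange_one_eq_nil (show w + 1 ≤ 1 by omega)]
      simp [PySem.Dict.empty]
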